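-- pv_equiv track=rewrite | github.com/hugoseabra/mercadopago_service | apps/core/util/string.py | clear_string
-- ===== SOURCE A (Python) =====
-- def clear_string(string, exclude_list=None):
--     if exclude_list is None:
--         exclude_list = list()
--
--     patterns_to_be_cleaned = [
--         '.',
--         '-',
--         '/',
--         '/',
--         '(',
--         ')',
--         '+',
--         ' ',
--     ]
--
--     if not string:
--         return string
--
--     for pattern in patterns_to_be_cleaned:
--         if pattern not in exclude_list:
--             string = string.replace(pattern, '')
--
--     return string
-- ===== SOURCE B (Python) =====
-- def clear_string(string, exclude_list=None):
--     if not string: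
--         return string
--     exclude = set(exclude_list) if exclude_list is not None else set()
--     table = {ord(c): None for c in '.-/()+ ' if c not in exclude}
--     return string.translate(table)
-- ===== Notes on version B (the rewrite author's own statement) =====
-- stated objective: idiomatic
-- what changed: Replaces A's eight sequential full-string replace passes with building a deletion table once and a single str.translate pass over the string.
import Mathlib
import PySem

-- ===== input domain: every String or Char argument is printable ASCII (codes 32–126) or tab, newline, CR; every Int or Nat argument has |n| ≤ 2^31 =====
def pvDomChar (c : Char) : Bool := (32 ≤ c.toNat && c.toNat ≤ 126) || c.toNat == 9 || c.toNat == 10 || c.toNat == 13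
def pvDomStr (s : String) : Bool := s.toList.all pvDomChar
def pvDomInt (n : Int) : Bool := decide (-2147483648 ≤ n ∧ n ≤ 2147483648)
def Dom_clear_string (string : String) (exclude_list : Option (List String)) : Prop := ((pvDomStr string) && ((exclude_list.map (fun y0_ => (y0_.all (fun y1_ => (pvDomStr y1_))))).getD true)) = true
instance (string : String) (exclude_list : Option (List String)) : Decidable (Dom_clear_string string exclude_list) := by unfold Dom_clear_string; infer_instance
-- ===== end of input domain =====

-- B replaces A's eight sequential full-string replace passes with building a deletion
-- table once and one single filtering (str.translate) pass over the string (idiomatic; one pass instead of eight).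

-- ===== PORT A =====
def clear_string (string : String) (exclude_list : Option (List String)) : String :=
  let exclude := exclude_list.getD []
  let patterns : List String := [".", "-", "/", "/", "(", ")", "+", " "]
  if string = "" then string
  else
    patterns.foldl (fun s pattern => if ¬ pattern ∈ exclude then PySem.Str.replace s pattern "" else s) string

-- ===== PORT B =====
def clear_string_alt (string : String) (exclude_list : Option (List String)) : String :=
  if string = "" then string
  else
    let exclude : PySem.Set String := PySem.Set.ofList (exclude_list.getD [])
    -- dict comprehension {ord(c): None for c in '.-/()+ ' if c not in exclude}
    let table : PySem.Dict Int (Option String) :=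
      ((".-/()+ ".toList).filter (fun c => !(PySem.Set.contains exclude (String.ofList [c])))).foldl
        (fun d c => d.insert ((c.toNat : Int)) none) PySem.Dict.empty
    -- str.translate: a char whose code is a key of the table is replaced by its value; the
    -- value None deletes it. Ported by hand; exact here because every value in table is none.
    String.ofList (string.toList.filter (fun c => !(table.contains ((c.toNat : Int)))))

-- ===== PRECONDITION & SPEC =====
def Spec_clear_string (string : String) (exclude_list : Option (List String)) (out : String) : Prop := out = clear_string_alt string exclude_list
instance (string : String) (exclude_list : Option (List String)) (out : String) : Decidable (Spec_clear_string string exclude_list out) := by unfold Spec_clear_string; infer_instance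

-- ===== CLAIM (what is proved, stated in full; the proofs are below) =====
def Claim_equal_clear_string : Prop := ∀ (string : String) (exclude_list : Option (List String)), Dom_clear_string string exclude_list → Spec_clear_string string exclude_list (clear_string string exclude_list)

-- ===== LEMMAS AND PROOFS =====

-- replace.go with a single-char pattern and empty replacement is a filter
lemma go_single (c : Char) : ∀ (fuel : Nat) (l acc : List Char), l.length ≤ fuel →
    PySem.Chars.replace.go [c] [] fuel l acc = acc.reverse ++ l.filter (fun x => x ≠ c) := by
  intro fuel
  induction fuel with
  | zero =>
    intro l acc h
    have : l = [] := List.eq_nil_of_length_eq_zero (Nat.le_zero.mp h)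
    subst this
    simp [PySem.Chars.replace.go]
  | succ n ih =>
    intro l acc h
    cases l with
    | nil => simp [PySem.Chars.replace.go]
    | cons hd tl =>
      rw [PySem.Chars.replace.go]
      by_cases hc : c = hd
      · subst hc
        have hpre : List.isPrefixOf [c] (c :: tl) = true := by simp [List.isPrefixOf]
        simp only [hpre, if_pos, List.reverse_nil, List.nil_append, List.length_cons,
          List.length_nil, Nat.zero_add, List.drop_one, List.tail_cons]
        rw [ih tl acc (by simpa using Nat.le_of_succ_le_succ h)]
        simp
      · have hpre : List.isPrefixOf [c] (hd :: tl) = false := by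
          simp [List.isPrefixOf]; exact fun habs => absurd habs hc
        simp only [hpre, Bool.false_eq_true, if_neg, not_false_iff]
        rw [ih tl (hd :: acc) (by simpa using Nat.le_of_succ_le_succ h)]
        simp [Ne.symm hc]

lemma replace_single (s : List Char) (c : Char) :
    PySem.Chars.replace s [c] [] = s.filter (fun x => x ≠ c) := by
  rw [PySem.Chars.replace]
  simp only [List.isEmpty_cons, Bool.false_eq_true, if_neg, not_false_iff]
  simpa using go_single c s.length s [] le_rfl

lemma replace_single_str (s : List Char) (c : Char) :
    PySem.Str.replace (String.ofList s) (String.ofList [c]) "" = String.ofList (s.filter (fun x => x ≠ c)) := by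
  apply String.toList_inj.mp
  rw [PySem.Str.toList_replace]
  simpa using replace_single s c

-- A's replace loop over single-char patterns is one filter
lemma foldA (ex : List String) : ∀ (ps : List Char) (s : List Char),
    (ps.map (fun c => String.ofList [c])).foldl
        (fun t p => if ¬ p ∈ ex then PySem.Str.replace t p "" else t) (String.ofList s)
      = String.ofList (s.filter (fun c => !(decide (c ∈ ps) && !(decide (String.ofList [c] ∈ ex))))) := by
  intro ps
  induction ps with
  | nil =>
    intro s
    simp
  | cons p ps ih =>
    intro s
    simp only [List.map_cons, List.foldl_cons]
    by_cases hp : String.ofList [p] ∈ ex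
    · rw [if_neg (by simpa using hp)]
      rw [ih s]
      congr 1
      apply List.filter_congr
      intro c _
      by_cases hcp : c = p
      · subst hcp; simp [hp]
      · simp [List.mem_cons, hcp]
    · rw [if_pos (by simpa using hp)]
      rw [replace_single_str, ih]
      rw [List.filter_filter]
      congr 1
      apply List.filter_congr
      intro c _
      by_cases hcp : c = p
      · subst hcp; simp [hp]
      · simp [List.mem_cons, hcp]

-- membership in B's translate table: the keys are exactly the codes of the listed chars
lemma table_contains : ∀ (cl : List Char) (d : PySem.Dict Int (Option String)) (k : Int),
    (cl.foldl (fun d x => d.insert ((x.toNat : Int)) none) d).contains k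
      = (decide (∃ c ∈ cl, (c.toNat : Int) = k) || d.contains k) := by
  intro cl
  induction cl with
  | nil =>
    intro d k
    simp only [List.foldl_nil, List.not_mem_nil, false_and, exists_false, decide_false,
      Bool.false_or]
  | cons hd tl ih =>
    intro d k
    simp only [List.foldl_cons]
    rw [ih]
    rw [PySem.Dict.contains_insert]
    rcases eq_or_ne (hd.toNat : Int) k with hk | hk
    · have h1 : (k == (hd.toNat : Int)) = true := by simp [hk.symm]
      simp [List.exists_mem_cons_iff, hk]
    · have h1 : (k == (hd.toNat : Int)) = false := by
        simp only [beq_eq_false_iff_ne, ne_eq]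
        exact fun h => hk h.symm
      by_cases he : ∃ c ∈ tl, (c.toNat : Int) = k
      · simp [he, h1]
      · simp [he, h1, hk]

lemma char_code_inj {a b : Char} (h : (a.toNat : Int) = (b.toNat : Int)) : a = b := by
  have h2 : a.toNat = b.toNat := by exact_mod_cast h
  exact Char.ext (UInt32.toNat_inj.mp h2)

set_option maxRecDepth 4000 in
theorem clear_string_spec : Claim_equal_clear_string := by
  intro string exclude_list _
  unfold Spec_clear_string clear_string clear_string_alt
  by_cases hs : string = ""
  · simp [hs]
  · simp only [if_neg hs]
    have hpat : ([".", "-", "/", "/", "(", ")", "+", " "] : List String)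
        = (['.', '-', '/', '/', '(', ')', '+', ' '].map (fun c => String.ofList [c])) := by decide
    rw [hpat]
    rw [show string = String.ofList string.toList from String.ofList_toList.symm]
    rw [foldA]
    simp only [String.toList_ofList]
    congr 1
    apply List.filter_congr
    intro c _
    rw [table_contains]
    simp only [PySem.Dict.contains_empty, Bool.or_false, List.mem_filter]
    have hchars : (".-/()+ " : String).toList = ['.', '-', '/', '(', ')', '+', ' '] := by decide
    simp only [hchars]
    by_cases hm : String.ofList [c] ∈ exclude_list.getD []
    · have hcon : PySem.Set.contains (PySem.Set.ofList (exclude_list.getD [])) (String.ofList [c]) = true := by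
        simp [PySem.Set.contains, PySem.Set.mem_ofList, hm]
      have hne : ¬ ∃ x, (x ∈ (['.', '-', '/', '(', ')', '+', ' '] : List Char) ∧
          (!(PySem.Set.contains (PySem.Set.ofList (exclude_list.getD [])) (String.ofList [x]))) = true) ∧
          ((x.toNat : Int) = (c.toNat : Int)) := by
        rintro ⟨x, ⟨_, hq⟩, hcode⟩
        cases char_code_inj hcode
        rw [hcon] at hq
        simp at hq
      rw [decide_eq_true hm, decide_eq_false hne]
      simp
    · have hcon : PySem.Set.contains (PySem.Set.ofList (exclude_list.getD [])) (String.ofList [c]) = false := by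
        simp [PySem.Set.contains, PySem.Set.mem_ofList, hm]
      by_cases hc7 : c ∈ (['.', '-', '/', '(', ')', '+', ' '] : List Char)
      · have hex : ∃ x, (x ∈ (['.', '-', '/', '(', ')', '+', ' '] : List Char) ∧
            (!(PySem.Set.contains (PySem.Set.ofList (exclude_list.getD [])) (String.ofList [x]))) = true) ∧
            ((x.toNat : Int) = (c.toNat : Int)) :=
          ⟨c, ⟨hc7, by rw [hcon]; rfl⟩, rfl⟩
        have hc8 : c ∈ (['.', '-', '/', '/', '(', ')', '+', ' '] : List Char) := by
          simp only [List.mem_cons] at hc7 ⊢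
          tauto
        rw [decide_eq_false hm, decide_eq_true hex, decide_eq_true hc8]
        simp
      · have hne : ¬ ∃ x, (x ∈ (['.', '-', '/', '(', ')', '+', ' '] : List Char) ∧
            (!(PySem.Set.contains (PySem.Set.ofList (exclude_list.getD [])) (String.ofList [x]))) = true) ∧
            ((x.toNat : Int) = (c.toNat : Int)) := by
          rintro ⟨x, ⟨hx, _⟩, hcode⟩
          cases char_code_inj hcode
          exact hc7 hx
        have hc8 : ¬ c ∈ (['.', '-', '/', '/', '(', ')', '+', ' '] : List Char) := by
          simp only [List.mem_cons] at hc7 ⊢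
          tauto
        rw [decide_eq_false hm, decide_eq_false hne, decide_eq_false hc8]
        simp
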